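-- pv_equiv track=rewrite | github.com/lemon-lime-honey/baekjoon | 프로그래머스/unrated/181926. 수 조작하기 1/수 조작하기 1.py | solution
-- ===== SOURCE A (Python) =====
-- def solution(n, control):
--     for letter in control:
--         if letter == 'w':
--             n += 1
--         elif letter == 'a':
--             n -= 10
--         elif letter == 's':
--             n -= 1
--         elif letter == 'd':
--             n += 10
--     return n
-- ===== SOURCE B (Python) =====
-- def solution(n, control):
--     table = {'w': 1, 'a': -10, 's': -1, 'd': 10}
--
--     def delta(s):
--         if not s:
--             return 0
--         if len(s) == 1:
--             return table.get(s, 0)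
--         mid = len(s) // 2
--         return delta(s[:mid]) + delta(s[mid:])
--
--     return n + delta(control)
-- ===== Notes on version B (the rewrite author's own statement) =====
-- stated objective: alternative
-- what changed: Replaces the per-character branching accumulator loop with a divide-and-conquer recursion that splits the string in half and sums the deltas of the halves, with a dict table lookup at single-character leaves.
import Mathlib
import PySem

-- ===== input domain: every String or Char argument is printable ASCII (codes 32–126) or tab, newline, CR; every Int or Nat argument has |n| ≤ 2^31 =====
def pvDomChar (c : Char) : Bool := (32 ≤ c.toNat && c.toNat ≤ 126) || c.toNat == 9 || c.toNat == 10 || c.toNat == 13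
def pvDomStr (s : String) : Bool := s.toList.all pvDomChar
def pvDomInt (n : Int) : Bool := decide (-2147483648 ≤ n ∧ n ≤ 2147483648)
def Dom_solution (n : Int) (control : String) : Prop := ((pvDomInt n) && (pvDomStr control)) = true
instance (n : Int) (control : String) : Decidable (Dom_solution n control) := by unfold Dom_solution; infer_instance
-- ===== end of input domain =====

-- ===== PORT A =====
-- B replaces A's per-character branching accumulator loop with a divide-and-conquer
-- recursion over the string plus a leaf table lookup (alternative decomposition).
def solution (n : Int) (control : String) : Int :=
  control.toList.foldl (fun n letter =>
    if letter == 'w' then n + 1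
    else if letter == 'a' then n - 10
    else if letter == 's' then n - 1
    else if letter == 'd' then n + 10
    else n) n

-- ===== PORT B =====
def pvTable : PySem.Dict Char Int :=
  PySem.Dict.ofList [('w', 1), ('a', -10), ('s', -1), ('d', 10)]

def pvDelta (l : List Char) : Int :=
  if _h0 : l = [] then 0
  else if _h1 : l.length = 1 then PySem.Dict.getD pvTable l.headI 0
  else pvDelta (l.take (l.length / 2)) + pvDelta (l.drop (l.length / 2))
termination_by l.length
decreasing_by
  all_goals
    have hlen : 2 ≤ l.length := by
      cases l with
      | nil => simp at _h0
      | cons a t => cases t with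
        | nil => simp at _h1
        | cons b u => simp
    simp [List.length_take, List.length_drop]
    omega

def solution_alt (n : Int) (control : String) : Int :=
  n + pvDelta control.toList

-- ===== PRECONDITION & SPEC =====
def Spec_solution (n : Int) (control : String) (out : Int) : Prop := out = solution_alt n control
instance (n : Int) (control : String) (out : Int) : Decidable (Spec_solution n control out) := by unfold Spec_solution; infer_instance

-- ===== CLAIM (what is proved, stated in full; the proofs are below) =====
def Claim_equal_solution : Prop := ∀ (n : Int) (control : String), Dom_solution n control → Spec_solution n control (solution n control)

-- ===== LEMMAS AND PROOFS =====
-- the per-character delta, as a plain function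
def pvD (c : Char) : Int :=
  if c = 'w' then 1 else if c = 'a' then -10 else if c = 's' then -1
  else if c = 'd' then 10 else 0

theorem pvDelta_eq_sum (l : List Char) : pvDelta l = (l.map pvD).sum := by
  induction l using pvDelta.induct with
  | case1 => simp [pvDelta]
  | case2 l h0 h1 =>
      obtain ⟨c, hc⟩ : ∃ c, l = [c] := by
        cases l with
        | nil => simp at h0
        | cons a t => cases t with
          | nil => exact ⟨a, rfl⟩
          | cons b u => simp at h1
      subst hc
      rw [pvDelta]
      simp only [List.headI, List.map, List.sum_cons, List.sum_nil, add_zero,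
        dif_neg (by simp : ¬([c] : List Char) = []), dif_pos (by simp : ([c] : List Char).length = 1)]
      by_cases hw : c = 'w'
      · subst hw; decide
      · by_cases ha : c = 'a'
        · subst ha; decide
        · by_cases hs : c = 's'
          · subst hs; decide
          · by_cases hd : c = 'd'
            · subst hd; decide
            · simp [pvTable, PySem.Dict.getD, PySem.Dict.ofList, PySem.Dict.get?,
                PySem.Dict.update, PySem.Dict.insert, PySem.Dict.empty, List.find?,
                pvD, hw, ha, hs, hd,
                beq_eq_false_iff_ne.mpr (Ne.symm hw), beq_eq_false_iff_ne.mpr (Ne.symm ha),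
                beq_eq_false_iff_ne.mpr (Ne.symm hs), beq_eq_false_iff_ne.mpr (Ne.symm hd)]
  | case3 l h0 h1 ih1 ih2 =>
      rw [pvDelta, dif_neg h0, dif_neg h1, ih1, ih2]
      conv_rhs => rw [← List.take_append_drop (l.length / 2) l]
      simp

theorem foldl_eq_add_sum (l : List Char) (n : Int) :
    l.foldl (fun n letter =>
      if letter == 'w' then n + 1
      else if letter == 'a' then n - 10
      else if letter == 's' then n - 1
      else if letter == 'd' then n + 10
      else n) n = n + (l.map pvD).sum := by
  induction l generalizing n with
  | nil => simp
  | cons c t ih =>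
      simp only [List.foldl_cons, ih, List.map, List.sum_cons, pvD]
      by_cases hw : c = 'w' <;> by_cases ha : c = 'a' <;> by_cases hs : c = 's' <;>
        by_cases hd : c = 'd' <;> simp_all <;> ring

-- ===== VERDICT (by name: the statement is the Claim_ definition above) =====
theorem solution_spec : Claim_equal_solution := by
  intro n control _
  unfold Spec_solution solution solution_alt
  rw [foldl_eq_add_sum, pvDelta_eq_sum]
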